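-- pv_equiv track=rewrite | github.com/enot9910/heart-age | src/heart-age/signal_analysis/signal_analysis.py | get_age_group
-- ===== SOURCE A (Python) =====
-- def get_age_group(age, age_groups):
--     if age_groups is None:
--         return age
--
--     age_groups_sorted = sorted(age_groups)
--     age_key = None
--
--     for i in range(len(age_groups_sorted)-1):
--         if age_groups_sorted[i] <= age < age_groups_sorted[i+1]:
--             age_key = age_groups_sorted[i]
--             break
--
--     if age_key is None and age >= age_groups_sorted[-1]:
--         age_key = age_groups_sorted[-1]
--
--     return age_key
-- ===== SOURCE B (Python) =====
-- def get_age_group(age, age_groups):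
--     if age_groups is None:
--         return age
--     # single scan of the thresholds sorted descending: the first one <= age
--     # is the bucket; None if age is below all thresholds (or there are none).
--     for g in sorted(age_groups, reverse=True):
--         if g <= age:
--             return g
--     return None
-- ===== Notes on version B (the rewrite author's own statement) =====
-- stated objective: simpler
-- what changed: Replaces the indexed scan over consecutive sorted pairs plus a separate last-element fallthrough by a single scan of the thresholds sorted in descending order returning the first threshold <= age.
import Mathlib
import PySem

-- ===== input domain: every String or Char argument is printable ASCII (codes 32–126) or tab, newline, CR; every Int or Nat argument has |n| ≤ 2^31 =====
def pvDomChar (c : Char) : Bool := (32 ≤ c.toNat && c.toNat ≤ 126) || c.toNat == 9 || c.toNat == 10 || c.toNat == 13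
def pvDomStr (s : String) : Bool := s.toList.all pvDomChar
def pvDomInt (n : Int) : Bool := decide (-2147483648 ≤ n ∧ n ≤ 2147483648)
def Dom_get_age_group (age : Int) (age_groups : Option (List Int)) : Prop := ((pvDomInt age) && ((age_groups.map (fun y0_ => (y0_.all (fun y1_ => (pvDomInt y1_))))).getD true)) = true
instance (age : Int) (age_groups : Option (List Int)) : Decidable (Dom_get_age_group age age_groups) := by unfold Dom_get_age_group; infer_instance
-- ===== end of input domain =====

-- B replaces A's indexed scan over consecutive sorted pairs (plus the last-element
-- fallthrough) by a single first-match scan of the descending-sorted thresholds: simpler.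

-- ===== PORT A =====
-- the 'for i in range(len(s)-1): if s[i] <= age < s[i+1]: age_key = s[i]; break' loop
def pvLoopA (age : Int) (s : List Int) (i : Nat) : Option Int :=
  if h : i + 1 < s.length then
    if s[i]'(by omega) ≤ age ∧ age < s[i+1] then some (s[i]'(by omega))
    else pvLoopA age s (i+1)
  else none
termination_by s.length - i

def get_age_group (age : Int) (age_groups : Option (List Int)) : Option Int :=
  match age_groups with
  | none => some age
  | some gs =>
    let s := PySem.List.sorted gs (fun x => x) false
    match pvLoopA age s 0 with
    | some k => some k
    | none =>
      match PySem.List.pyGet? s (-1) with          -- age_groups_sorted[-1]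
      | none => none                               -- IndexError in Python; excluded by Pre_
      | some last => if age ≥ last then some last else none

-- ===== PORT B =====
-- 'for g in sorted(age_groups, reverse=True): if g <= age: return g' / 'return None'
def pvFindLE (age : Int) : List Int → Option Int
  | [] => none
  | g :: t => if g ≤ age then some g else pvFindLE age t

def get_age_group_alt (age : Int) (age_groups : Option (List Int)) : Option Int :=
  match age_groups with
  | none => some age
  | some gs => pvFindLE age (PySem.List.sorted gs (fun x => x) true)

-- ===== PRECONDITION & SPEC =====
-- Pre_ excludes only age_groups == some [], on which Python A raises IndexError.
def Pre_get_age_group (age : Int) (age_groups : Option (List Int)) : Prop :=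
  age_groups ≠ some []
instance (age : Int) (age_groups : Option (List Int)) : Decidable (Pre_get_age_group age age_groups) := by unfold Pre_get_age_group; infer_instance

def pvWitness_get_age_group : Int × Option (List Int) := (30, some [0, 18, 65])

def Spec_get_age_group (age : Int) (age_groups : Option (List Int)) (out : Option Int) : Prop := out = get_age_group_alt age age_groups
instance (age : Int) (age_groups : Option (List Int)) (out : Option Int) : Decidable (Spec_get_age_group age age_groups out) := by unfold Spec_get_age_group; infer_instance

-- ===== CLAIM (what is proved, stated in full; the proofs are below) =====
def Claim_equal_get_age_group : Prop := ∀ (age : Int) (age_groups : Option (List Int)), Dom_get_age_group age age_groups → Pre_get_age_group age age_groups → Spec_get_age_group age age_groups (get_age_group age age_groups)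

-- ===== LEMMAS AND PROOFS =====

-- elements strictly inside the takeWhile prefix satisfy the predicate
theorem pv_tw_get (p : Int → Bool) (s : List Int) (j : Nat)
    (hj : j < (s.takeWhile p).length) (hjs : j < s.length) : p (s[j]'hjs) = true := by
  have hpre := List.takeWhile_prefix (l := s) (p := p)
  have hget : (s.takeWhile p)[j]'hj = s[j]'hjs := hpre.getElem hj
  have hmem : (s.takeWhile p)[j]'hj ∈ s.takeWhile p := List.getElem_mem hj
  have := List.mem_takeWhile_imp hmem
  rwa [hget] at this

-- the element just after the takeWhile prefix violates the predicate
theorem pv_tw_stop (p : Int → Bool) (s : List Int)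
    (h : (s.takeWhile p).length < s.length) :
    p (s[(s.takeWhile p).length]'h) = false := by
  induction s with
  | nil => simp at h
  | cons a t ih =>
    by_cases ha : p a
    · simp [ha] at h ⊢
      exact ih (by omega)
    · simp [ha]

theorem pv_mono (s : List Int) (hp : s.Pairwise (· ≤ ·)) (i j : Nat)
    (hij : i ≤ j) (hjs : j < s.length) : s[i]'(by omega) ≤ s[j]'hjs := by
  rcases Nat.lt_or_ge i j with h | h
  · exact (List.pairwise_iff_getElem.mp hp) i j (by omega) hjs h
  · have : i = j := by omega
    subst this; exact le_refl _

-- characterization of A's loop: with idx = |takeWhile (· ≤ age) s|,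
-- it returns s[idx-1] when 0 < idx < |s|, otherwise none
theorem pv_loopA_eq (age : Int) (s : List Int) (hp : s.Pairwise (· ≤ ·)) :
    ∀ i, pvLoopA age s i =
      if i < (s.takeWhile (fun x => decide (x ≤ age))).length ∧
         (s.takeWhile (fun x => decide (x ≤ age))).length < s.length
      then s[(s.takeWhile (fun x => decide (x ≤ age))).length - 1]?
      else none := by
  set p : Int → Bool := fun x => decide (x ≤ age) with hpdef
  set idx := (s.takeWhile p).length with hidx
  have hidx_le : idx ≤ s.length := (List.takeWhile_sublist _).length_le
  have f1 : ∀ j, (hj : j < idx) → (hjs : j < s.length) → s[j]'hjs ≤ age := by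
    intro j hj hjs
    have := pv_tw_get p s j hj hjs
    simpa [hpdef] using this
  have f2 : ∀ (h : idx < s.length), age < s[idx]'h := by
    intro h
    by_contra hle
    push_neg at hle
    have h2 := pv_tw_stop p s h
    simp only [hpdef, decide_eq_false_iff_not] at h2
    exact h2 hle
  have key : ∀ n i, s.length - i ≤ n → pvLoopA age s i =
      if i < idx ∧ idx < s.length then s[idx - 1]? else none := by
    intro n
    induction n with
    | zero =>
      intro i hi
      rw [pvLoopA]
      have hno : ¬ i + 1 < s.length := by omega
      simp only [hno, dif_neg, not_false_iff]
      have : ¬ (i < idx ∧ idx < s.length) := by omega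
      simp [this]
    | succ m ih =>
      intro i hi
      rw [pvLoopA]
      by_cases h : i + 1 < s.length
      · simp only [h, dif_pos]
        by_cases hc : s[i]'(by omega) ≤ age ∧ age < s[i+1]'h
        · -- the loop hits: idx = i + 1
          have hik : i < idx := by
            by_contra hni
            have h1 : idx < s.length := by omega
            have := f2 h1
            have := pv_mono s hp idx i (by omega) (by omega)
            omega
          have hk1 : idx ≤ i + 1 := by
            by_contra hni
            have := f1 (i+1) (by omega) h
            omega
          have hkeq : idx = i + 1 := by omega
          have hcond : i < idx ∧ idx < s.length := by omega
          simp only [hc, if_pos, hcond, and_self]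
          have hieq : idx - 1 = i := by omega
          rw [hieq, List.getElem?_eq_getElem (by omega)]
        · simp only [hc, if_neg, not_false_iff]
          rw [ih (i+1) (by omega)]
          have hne : idx ≠ i + 1 := by
            intro hkeq
            apply hc
            refine ⟨f1 i (by omega) (by omega), ?_⟩
            have := f2 (h := by omega)
            have : age < s[idx]'(by omega) := this
            simp only [hkeq] at this
            exact this
          by_cases h2 : idx < s.length
          · by_cases h3 : i + 1 < idx
            · simp [h3, h2, show i < idx by omega]
            · have : ¬ i < idx := by omega
              simp [this, show ¬ i + 1 < idx by omega]
          · simp [h2]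
      · simp only [h, dif_neg, not_false_iff]
        have : ¬ (i < idx ∧ idx < s.length) := by omega
        simp [this]
  intro i
  exact key (s.length - i) i (le_refl _)

theorem pv_findLE_none_iff (age : Int) (r : List Int) :
    pvFindLE age r = none ↔ ∀ x ∈ r, ¬ x ≤ age := by
  induction r with
  | nil => simp [pvFindLE]
  | cons g t ih =>
    by_cases hg : g ≤ age
    · simp [pvFindLE, hg]
    · simp [pvFindLE, hg, ih]
      exact fun _ => lt_of_not_ge hg

theorem pv_findLE_some (age : Int) (r : List Int)
    (hp : r.Pairwise (fun a b => b ≤ a)) (v : Int)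
    (hv : pvFindLE age r = some v) :
    v ∈ r ∧ v ≤ age ∧ ∀ x ∈ r, x ≤ age → x ≤ v := by
  induction r with
  | nil => simp [pvFindLE] at hv
  | cons g t ih =>
    rcases List.pairwise_cons.mp hp with ⟨hg, hpt⟩
    by_cases h : g ≤ age
    · simp [pvFindLE, h] at hv
      subst hv
      exact ⟨List.mem_cons_self, h, fun x hx _ => by
        rcases List.mem_cons.mp hx with rfl | hx
        · exact le_refl _
        · exact hg x hx⟩
    · simp [pvFindLE, h] at hv
      rcases ih hpt hv with ⟨hm, hle, hmax⟩
      exact ⟨List.mem_cons_of_mem _ hm, hle, fun x hx hxa => by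
        rcases List.mem_cons.mp hx with rfl | hx
        · exact absurd hxa h
        · exact hmax x hx hxa⟩

-- B returns some v whenever v is a maximal threshold ≤ age
theorem pv_findLE_char (age : Int) (r : List Int)
    (hp : r.Pairwise (fun a b => b ≤ a)) (v : Int)
    (hm : v ∈ r) (hle : v ≤ age) (hmax : ∀ x ∈ r, x ≤ age → x ≤ v) :
    pvFindLE age r = some v := by
  cases hv : pvFindLE age r with
  | none => exact absurd hle ((pv_findLE_none_iff age r).mp hv v hm)
  | some w =>
    rcases pv_findLE_some age r hp w hv with ⟨hwm, hwle, hwmax⟩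
    have h1 : w ≤ v := hmax w hwm hwle
    have h2 : v ≤ w := hwmax v hm hle
    exact congrArg some (le_antisymm h1 h2)

-- main equivalence on a nonempty list
theorem pv_main (age : Int) (gs : List Int) (hne : gs ≠ []) :
    get_age_group age (some gs) = get_age_group_alt age (some gs) := by
  simp only [get_age_group, get_age_group_alt]
  set s := PySem.List.sorted gs (fun x => x) false with hs
  set r := PySem.List.sorted gs (fun x => x) true with hr
  have hp : s.Pairwise (· ≤ ·) := by
    have := PySem.List.sorted_pairwise (xs := gs) (key := fun x => x)
    simpa [hs] using this
  have hpr : r.Pairwise (fun a b => b ≤ a) := by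
    have := PySem.List.sorted_pairwise_rev (xs := gs) (key := fun x => x)
    simpa [hr] using this
  have hsne : s ≠ [] := by
    rw [hs, Ne, PySem.List.sorted_eq_nil_iff]; exact hne
  have hslen : 0 < s.length := List.length_pos_iff.mpr hsne
  have hmem : ∀ x, x ∈ s ↔ x ∈ r := by
    intro x
    rw [hs, hr, PySem.List.mem_sorted, PySem.List.mem_sorted]
  set p : Int → Bool := fun x => decide (x ≤ age) with hpdef
  set idx := (s.takeWhile p).length with hidx
  have hidx_le : idx ≤ s.length := (List.takeWhile_sublist _).length_le
  have f1 : ∀ j, (hj : j < idx) → (hjs : j < s.length) → s[j]'hjs ≤ age := by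
    intro j hj hjs
    have := pv_tw_get p s j hj hjs
    simpa [hpdef] using this
  have f2 : ∀ (h : idx < s.length), age < s[idx]'h := by
    intro h
    by_contra hle
    push_neg at hle
    have h2 := pv_tw_stop p s h
    simp only [hpdef, decide_eq_false_iff_not] at h2
    exact h2 hle
  have hmaxle : ∀ k, (hk : k < s.length) → (∀ j, (hj : j < s.length) → j > k → ¬ s[j]'hj ≤ age) →
      ∀ x ∈ r, x ≤ age → x ≤ s[k]'hk := by
    intro k hk habove x hx hxa
    rcases List.mem_iff_getElem.mp ((hmem x).mpr hx) with ⟨j, hj, rfl⟩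
    rcases Nat.lt_or_ge k j with hjk | hjk
    · exact absurd hxa (habove j hj hjk)
    · exact pv_mono s hp j k hjk hk
  rw [pv_loopA_eq age s hp 0, ← hpdef, ← hidx]
  by_cases h1 : 0 < idx ∧ idx < s.length
  · -- the pair loop hits: both sides return s[idx-1]
    rw [if_pos h1, List.getElem?_eq_getElem (by omega)]
    refine (pv_findLE_char age r hpr _ ((hmem _).mp (List.getElem_mem (by omega))) (f1 _ (by omega) (by omega)) ?_).symm
    refine hmaxle (idx - 1) (by omega) ?_
    intro j hj hjk hle
    have hlt : age < s[idx]'(by omega) := f2 (by omega)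
    have := pv_mono s hp idx j (by omega) hj
    omega
  · by_cases h2 : idx = 0
    · -- age below every threshold: both sides None
      rw [if_neg h1]
      have hall : ∀ x ∈ r, ¬ x ≤ age := by
        intro x hx
        rcases List.mem_iff_getElem.mp ((hmem x).mpr hx) with ⟨j, hj, rfl⟩
        have ha0 : age < s[0]'hslen := by
          have h0 := f2 (h := by omega)
          simpa [h2] using h0
        have := pv_mono s hp 0 j (by omega) hj
        omega
      rw [(pv_findLE_none_iff age r).mpr hall]
      rw [PySem.List.pyGet?_neg_one, List.getLast?_eq_getElem?,
        List.getElem?_eq_getElem (by omega)]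
      have hlast : ¬ age ≥ s[s.length - 1]'(by omega) := by
        have := hall (s[s.length - 1]'(by omega)) ((hmem _).mp (List.getElem_mem (by omega)))
        omega
      simp [hlast]
    · -- every threshold ≤ age: both sides return the largest one
      have hidxlen : idx = s.length := by omega
      rw [if_neg h1]
      rw [PySem.List.pyGet?_neg_one, List.getLast?_eq_getElem?,
        List.getElem?_eq_getElem (by omega)]
      have hlastle : s[s.length - 1]'(by omega) ≤ age := f1 _ (by omega) (by omega)
      have hge : age ≥ s[s.length - 1]'(by omega) := by omega
      have hB : pvFindLE age r = some (s[s.length - 1]'(by omega)) :=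
        pv_findLE_char age r hpr _ ((hmem _).mp (List.getElem_mem (by omega))) hlastle
          (hmaxle (s.length - 1) (by omega) (fun j hj hjk => by omega))
      rw [hB]
      simp [hge]

-- ===== VERDICT (by name: the statement is the Claim_ definition above) =====
theorem get_age_group_spec : Claim_equal_get_age_group := by
  intro age ags _ hpre
  unfold Spec_get_age_group
  cases ags with
  | none => rfl
  | some gs =>
    have hne : gs ≠ [] := by intro h; exact hpre (by rw [h])
    exact pv_main age gs hne
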